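-- pv_equiv track=rewrite | github.com/Yquetzal/tnetwork | tnetwork/utils/figpy.py | _unescapeText
-- ===== SOURCE A (Python) =====
-- def _unescapeText(text):
--     chunks = text.split("\\")
--     result = chunks[0]
--     i = 1
--     while i < len(chunks):
--         if chunks[i]:
--             result += chr(int(chunks[i][:3], 8)) + chunks[i][3:]
--             i += 1
--         else:
--             result += "\\" + chunks[i + 1]
--             i += 2
--     return result
-- ===== SOURCE B (Python) =====
-- def _unescapeText(text):
--     # Single left-to-right scan with an explicit pointer instead of split("\\") + chunk loop.
--     out = []
--     i = 0
--     n = len(text)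
--     while i < n:
--         c = text[i]
--         if c != "\\":
--             out.append(c)
--             i += 1
--         else:
--             nxt = text[i + 1]  # trailing lone backslash raises IndexError, as in the original
--             if nxt == "\\":
--                 out.append("\\")
--                 i += 2
--             else:
--                 j = i + 1
--                 while j < n and j < i + 4 and text[j] != "\\":
--                     j += 1
--                 out.append(chr(int(text[i + 1:j], 8)))
--                 i = j
--     return "".join(out)
-- ===== Notes on version B (the rewrite author's own statement) =====
-- stated objective: alternative
-- what changed: Replaces split-on-backslash plus an index-stepping chunk loop (with the empty-chunk trick for doubled backslashes) by a single left-to-right character scan with an explicit pointer that parses each escape field in place.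
import Mathlib
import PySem

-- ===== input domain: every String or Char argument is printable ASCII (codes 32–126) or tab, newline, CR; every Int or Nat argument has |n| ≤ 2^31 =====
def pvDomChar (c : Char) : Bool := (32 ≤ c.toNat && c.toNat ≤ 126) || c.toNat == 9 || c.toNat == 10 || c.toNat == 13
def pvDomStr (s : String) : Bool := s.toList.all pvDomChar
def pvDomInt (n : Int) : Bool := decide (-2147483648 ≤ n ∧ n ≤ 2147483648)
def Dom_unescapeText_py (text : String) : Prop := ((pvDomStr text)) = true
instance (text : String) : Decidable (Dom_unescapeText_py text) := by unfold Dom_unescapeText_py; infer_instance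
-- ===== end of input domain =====

-- B is an alternative of the same cost: one left-to-right character scan with an explicit
-- pointer replaces A's split("\\") + index-stepping chunk loop.

-- Shared escape step: chr(int(field, 8)). PySem.Int.ofCharsBase? is exactly int(s, 8);
-- Char.ofNat is exact for every value chr receives under Pre_ (0 ≤ v < 512).
-- Returns [] where Python raises ValueError — such inputs are excluded by Pre_.
def pvChr (field : List Char) : List Char :=
  match PySem.Int.ofCharsBase? field 8 with
  | some v => if 0 ≤ v then [Char.ofNat v.toNat] else []
  | none => []

-- ===== PORT A =====
-- the while loop over chunks, i stepping by 1 (nonempty chunk) or 2 (empty chunk = "\\\\")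
def pvLoopA : List (List Char) → List Char → List Char
  | [], res => res
  | c :: rest, res =>
    if c ≠ [] then pvLoopA rest (res ++ (pvChr (c.take 3) ++ c.drop 3))
    else
      match rest with
      | [] => res            -- Python raises IndexError here (chunks[i+1]); excluded by Pre_
      | d :: rest' => pvLoopA rest' (res ++ '\\' :: d)

def unescapeText_py (text : String) : String :=
  let chunks := PySem.Chars.splitOn text.toList ['\\']
  String.ofList (pvLoopA chunks.tail (chunks.headD []))   -- chunks[0]: splitOn never returns []

-- ===== PORT B =====
-- single scan; on '\', read the next char (IndexError if absent — excluded by Pre_);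
-- '\\' emits a backslash, otherwise up to 3 chars (stopping at a backslash) form the octal field
def pvGoB : List Char → List Char
  | [] => []
  | ['\\'] => []           -- Python raises IndexError here (text[i+1]); excluded by Pre_
  | '\\' :: d :: r =>
    if d = '\\' then '\\' :: pvGoB r
    else
      let field := ((d :: r).take 3).takeWhile (· ≠ '\\')
      pvChr field ++ pvGoB ((d :: r).drop field.length)
  | c :: rest => c :: pvGoB rest
termination_by l => l.length
decreasing_by all_goals simp [List.length_drop]; try omega

def unescapeText_py_alt (text : String) : String := String.ofList (pvGoB text.toList)

-- ===== PRECONDITION & SPEC =====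
-- Pre_ excludes exactly the inputs where Python raises (IndexError / ValueError), nothing else:
-- a backslash preceded by an even number of consecutive backslashes starts an escape; it must
-- have a next character, and unless that is a backslash, the following ≤3 characters (stopping
-- at a backslash) must parse as a nonnegative octal int.
def Pre_unescapeText_py (text : String) : Prop :=
  ∀ i : Nat, i < text.toList.length →
    text.toList[i]? = some '\\' →
    ((text.toList.take i).reverse.takeWhile (· = '\\')).length % 2 = 0 →
    i + 1 < text.toList.length ∧
      (text.toList[i + 1]? = some '\\' ∨
        0 ≤ (PySem.Int.ofCharsBase?
              (((text.toList.drop (i + 1)).take 3).takeWhile (· ≠ '\\')) 8).getD (-1))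
instance (text : String) : Decidable (Pre_unescapeText_py text) := by
  unfold Pre_unescapeText_py; infer_instance

def pvWitness_unescapeText_py : String := "a\\101\\\\b"

def Spec_unescapeText_py (text : String) (out : String) : Prop := out = unescapeText_py_alt text
instance (text : String) (out : String) : Decidable (Spec_unescapeText_py text out) := by
  unfold Spec_unescapeText_py; infer_instance

-- ===== CLAIM (what is proved, stated in full; the proofs are below) =====
def Claim_equal_unescapeText_py : Prop := ∀ (text : String), Dom_unescapeText_py text → Pre_unescapeText_py text → Spec_unescapeText_py text (unescapeText_py text)

-- ===== LEMMAS AND PROOFS =====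

theorem pv_go_acc (f : Nat) (l cur : List Char) (acc : List (List Char)) :
    PySem.Chars.splitOn.go ['\\'] f l cur acc
      = acc.reverse ++ PySem.Chars.splitOn.go ['\\'] f l cur [] := by
  induction f generalizing l cur acc with
  | zero => simp [PySem.Chars.splitOn.go]
  | succ f ih =>
    cases l with
    | nil => simp [PySem.Chars.splitOn.go]
    | cons c rest =>
      rw [PySem.Chars.splitOn.go, PySem.Chars.splitOn.go]
      by_cases h : ['\\'].isPrefixOf (c :: rest)
      · simp only [h, if_true]
        rw [ih _ _ ([cur.reverse]), ih _ _ (cur.reverse :: acc)]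
        simp
      · simp only [h]
        exact ih _ _ acc

theorem pv_go_nosep (f : Nat) (l cur : List Char) (h : '\\' ∉ l) :
    PySem.Chars.splitOn.go ['\\'] f l cur [] = [cur.reverse ++ l] := by
  induction f generalizing l cur with
  | zero => simp [PySem.Chars.splitOn.go]
  | succ f ih =>
    cases l with
    | nil => simp [PySem.Chars.splitOn.go]
    | cons c rest =>
      rw [PySem.Chars.splitOn.go]
      have hc : c ≠ '\\' := fun e => h (e ▸ List.mem_cons_self ..)
      have hp : ['\\'].isPrefixOf (c :: rest) = false := by
        simp [List.isPrefixOf]; intro e; exact absurd e.symm hc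
      simp only [hp, Bool.false_eq_true, if_false]
      rw [ih rest (c :: cur) (fun m => h (List.mem_cons_of_mem _ m))]
      simp

theorem pv_go_pre (pre : List Char) (f : Nat) (cur rest : List Char)
    (h : '\\' ∉ pre) (hf : pre.length < f) :
    PySem.Chars.splitOn.go ['\\'] f (pre ++ '\\' :: rest) cur []
      = (cur.reverse ++ pre) :: PySem.Chars.splitOn.go ['\\'] (f - pre.length - 1) rest [] [] := by
  induction pre generalizing f cur with
  | nil =>
    obtain ⟨f', rfl⟩ : ∃ f', f = f' + 1 := ⟨f - 1, by omega⟩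
    rw [List.nil_append, PySem.Chars.splitOn.go]
    have hp : ['\\'].isPrefixOf ('\\' :: rest) = true := by simp [List.isPrefixOf]
    simp only [hp, if_true]
    rw [pv_go_acc]
    simp
  | cons a pre' ih =>
    obtain ⟨f', rfl⟩ : ∃ f', f = f' + 1 := ⟨f - 1, by omega⟩
    rw [List.cons_append, PySem.Chars.splitOn.go]
    have ha : a ≠ '\\' := fun e => h (e ▸ List.mem_cons_self ..)
    have hp : ['\\'].isPrefixOf (a :: (pre' ++ '\\' :: rest)) = false := by
      simp [List.isPrefixOf]; intro e; exact absurd e.symm ha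
    simp only [hp, Bool.false_eq_true, if_false]
    rw [ih f' (a :: cur) (fun m => h (List.mem_cons_of_mem _ m)) (by simp only [List.length_cons] at hf; omega)]
    have e : f' + 1 - (a :: pre').length - 1 = f' - pre'.length - 1 := by
      simp only [List.length_cons]; omega
    rw [e]
    simp

theorem pv_splitOn_nosep (l : List Char) (h : '\\' ∉ l) :
    PySem.Chars.splitOn l ['\\'] = [l] := by
  rw [PySem.Chars.splitOn, pv_go_nosep _ _ _ h]; simp

theorem pv_splitOn_cons (pre rest : List Char) (h : '\\' ∉ pre) :
    PySem.Chars.splitOn (pre ++ '\\' :: rest) ['\\'] = pre :: PySem.Chars.splitOn rest ['\\'] := by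
  rw [PySem.Chars.splitOn, pv_go_pre pre _ _ rest h (by simp)]
  have : (pre ++ '\\' :: rest).length + 1 - pre.length - 1 = rest.length + 1 := by simp; omega
  rw [this, PySem.Chars.splitOn]
  simp

theorem pv_loopA_acc_aux (n : Nat) : ∀ ch : List (List Char), ch.length ≤ n →
    ∀ res, pvLoopA ch res = res ++ pvLoopA ch [] := by
  induction n with
  | zero =>
    intro ch h res
    have : ch = [] := List.length_eq_zero_iff.mp (Nat.le_zero.mp h)
    subst this; simp [pvLoopA]
  | succ n ih =>
    intro ch h res
    match ch with
    | [] => simp [pvLoopA]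
    | c :: rest =>
      by_cases hc : c = []
      · subst hc
        match rest with
        | [] => simp [pvLoopA]
        | d :: rest' =>
          have e : ∀ r, pvLoopA ([] :: d :: rest') r = pvLoopA rest' (r ++ '\\' :: d) := by
            intro r; simp [pvLoopA]
          rw [e, e, ih rest' (by simp only [List.length_cons] at h; omega),
              ih rest' (by simp only [List.length_cons] at h; omega) ([] ++ '\\' :: d)]
          simp only [List.nil_append, List.append_assoc]
      · have e : ∀ r, pvLoopA (c :: rest) r
            = pvLoopA rest (r ++ (pvChr (c.take 3) ++ c.drop 3)) := by
          intro r; rw [pvLoopA.eq_def]; simp [hc]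
        rw [e, e, ih rest (by simp only [List.length_cons] at h; omega),
            ih rest (by simp only [List.length_cons] at h; omega) ([] ++ _)]
        simp only [List.nil_append, List.append_assoc]

theorem pv_loopA_acc (ch : List (List Char)) (res : List Char) :
    pvLoopA ch res = res ++ pvLoopA ch [] :=
  pv_loopA_acc_aux ch.length ch le_rfl res

theorem pv_goB_cons_ne (a : Char) (l : List Char) (ha : a ≠ '\\') :
    pvGoB (a :: l) = a :: pvGoB l := by
  rw [pvGoB.eq_def]
  split <;> simp_all

theorem pv_goB_free (pre l : List Char) (h : '\\' ∉ pre) :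
    pvGoB (pre ++ l) = pre ++ pvGoB l := by
  induction pre with
  | nil => simp
  | cons a pre' ih =>
    have ha : a ≠ '\\' := fun e => h (e ▸ List.mem_cons_self ..)
    rw [List.cons_append, pv_goB_cons_ne a _ ha, ih (fun m => h (List.mem_cons_of_mem _ m))]
    simp

theorem pv_take_takeWhile (p : Char → Bool) (l : List Char) (n : Nat) :
    (l.take n).takeWhile p = (l.takeWhile p).take n := by
  induction l generalizing n with
  | nil => simp
  | cons a t ih =>
    match n with
    | 0 => simp
    | Nat.succ m =>
      by_cases hp : p a
      · simp [List.take_succ_cons, hp, ih]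
      · simp [List.take_succ_cons, hp]

theorem pv_loopA_cons_ne (c : List Char) (rest : List (List Char)) (res : List Char) (hc : c ≠ []) :
    pvLoopA (c :: rest) res = pvLoopA rest (res ++ (pvChr (c.take 3) ++ c.drop 3)) := by
  rw [pvLoopA.eq_def]; simp [hc]

theorem pv_goB_esc (d : Char) (r : List Char) (hd : d ≠ '\\') :
    pvGoB ('\\' :: d :: r)
      = pvChr (((d :: r).take 3).takeWhile (· ≠ '\\'))
        ++ pvGoB ((d :: r).drop (((d :: r).take 3).takeWhile (· ≠ '\\')).length) := by
  rw [pvGoB.eq_def]; simp [hd]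

theorem pv_dropWhile_head (l : List Char) (a : Char) (t : List Char)
    (h : l.dropWhile (· ≠ '\\') = a :: t) : a = '\\' := by
  induction l with
  | nil => simp at h
  | cons b u ih =>
    by_cases hb : b = '\\'
    · subst hb
      rw [List.dropWhile_cons_of_neg (by simp)] at h
      exact (List.cons.injEq .. ▸ h).1.symm
    · rw [List.dropWhile_cons_of_pos (by simp [hb])] at h
      exact ih h

theorem pv_first_sep (l : List Char) (h : '\\' ∈ l) :
    l = l.takeWhile (· ≠ '\\') ++ '\\' :: (l.dropWhile (· ≠ '\\')).tail
      ∧ '\\' ∉ l.takeWhile (· ≠ '\\') := by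
  induction l with
  | nil => simp at h
  | cons a t ih =>
    by_cases ha : a = '\\'
    · subst ha
      rw [List.takeWhile_cons_of_neg (by simp), List.dropWhile_cons_of_neg (by simp)]
      simp
    · have ht : '\\' ∈ t := by
        rcases List.mem_cons.mp h with e | e
        · exact absurd e.symm ha
        · exact e
      obtain ⟨h1, h2⟩ := ih ht
      rw [List.takeWhile_cons_of_pos (by simp [ha]), List.dropWhile_cons_of_pos (by simp [ha])]
      constructor
      · rw [List.cons_append]
        exact congrArg (a :: ·) h1
      · intro hm
        rcases List.mem_cons.mp hm with e | e
        · exact ha e.symm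
        · exact h2 e

theorem pv_splitOn_ne_nil (l : List Char) : PySem.Chars.splitOn l ['\\'] ≠ [] := by
  by_cases h : '\\' ∈ l
  · obtain ⟨hdec, hfree⟩ := pv_first_sep l h
    rw [hdec, pv_splitOn_cons _ _ hfree]; simp
  · rw [pv_splitOn_nosep l h]; simp

theorem pv_main (n : Nat) : ∀ l : List Char, l.length ≤ n →
    (pvGoB l = (PySem.Chars.splitOn l ['\\']).headD []
        ++ pvLoopA (PySem.Chars.splitOn l ['\\']).tail []) ∧
    (pvGoB ('\\' :: l) = pvLoopA (PySem.Chars.splitOn l ['\\']) []) := by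
  induction n with
  | zero =>
    intro l hl
    have : l = [] := List.length_eq_zero_iff.mp (Nat.le_zero.mp hl)
    subst this
    constructor
    · simp [pvGoB, pv_splitOn_nosep [] (by simp), pvLoopA]
    · simp [pvGoB, pv_splitOn_nosep [] (by simp), pvLoopA]
  | succ n ih =>
    intro l hl
    have main : ∀ m : List Char, m.length ≤ n →
        pvGoB m = (PySem.Chars.splitOn m ['\\']).headD []
          ++ pvLoopA (PySem.Chars.splitOn m ['\\']).tail [] := fun m hm => (ih m hm).1
    have q : ∀ m : List Char, m.length ≤ n →
        pvGoB ('\\' :: m) = pvLoopA (PySem.Chars.splitOn m ['\\']) [] := fun m hm => (ih m hm).2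
    constructor
    · -- MAIN at l
      by_cases h : '\\' ∈ l
      · obtain ⟨hdec, hfree⟩ := pv_first_sep l h
        set pre := l.takeWhile (· ≠ '\\') with hpre
        set rest := (l.dropWhile (· ≠ '\\')).tail with hrest
        have hlen : rest.length ≤ n := by
          have := congrArg List.length hdec
          simp at this; omega
        rw [hdec, pv_splitOn_cons _ _ hfree, pv_goB_free _ _ hfree, q rest hlen]
        simp
      · rw [pv_splitOn_nosep l h]
        have := pv_goB_free l [] h
        simp at this
        simp [this, pvLoopA, pvGoB]
    · -- Q at l
      match l with
      | [] =>
        simp [pvGoB, pv_splitOn_nosep [] (by simp), pvLoopA]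
      | d :: r =>
        by_cases hd : d = '\\'
        · subst hd
          have hr : r.length ≤ n := by simp at hl; omega
          have hcons : PySem.Chars.splitOn ('\\' :: r) ['\\'] = [] :: PySem.Chars.splitOn r ['\\'] := by
            have := pv_splitOn_cons [] r (by simp)
            simpa using this
          obtain ⟨hdq, tl, hS⟩ : ∃ hd tl, PySem.Chars.splitOn r ['\\'] = hd :: tl := by
            rcases he : PySem.Chars.splitOn r ['\\'] with _ | ⟨a, b⟩
            · exact absurd he (pv_splitOn_ne_nil r)
            · exact ⟨a, b, rfl⟩
          have hmain := main r hr
          rw [hS] at hmain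
          simp at hmain
          rw [show pvGoB ('\\' :: '\\' :: r) = '\\' :: pvGoB r by simp [pvGoB]]
          rw [hcons, hS, hmain]
          rw [show pvLoopA ([] :: hdq :: tl) [] = pvLoopA tl ('\\' :: hdq) by simp [pvLoopA]]
          rw [pv_loopA_acc tl ('\\' :: hdq)]
          simp
        · -- octal-field chunk
          set chunk := (d :: r).takeWhile (· ≠ '\\') with hchunk
          set z := (d :: r).dropWhile (· ≠ '\\') with hz
          have hdzl : d :: r = chunk ++ z := (List.takeWhile_append_dropWhile).symm
          have hchunkfree : '\\' ∉ chunk := by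
            intro hm; have := List.mem_takeWhile_imp hm; simp at this
          have hchunkne : chunk ≠ [] := by
            rw [hchunk, List.takeWhile_cons]; simp [hd]
          have hfield : ((d :: r).take 3).takeWhile (· ≠ '\\') = chunk.take 3 :=
            pv_take_takeWhile _ _ _
          have hklen : (chunk.take 3).length = min 3 chunk.length := by simp
          have hkle : (chunk.take 3).length ≤ chunk.length := by rw [hklen]; omega
          have hdropfree : '\\' ∉ chunk.drop 3 := fun hm => hchunkfree (List.mem_of_mem_drop hm)
          have hdrop : (d :: r).drop (chunk.take 3).length = chunk.drop 3 ++ z := by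
            rw [hdzl, List.drop_append_of_le_length hkle]
            congr 1
            rcases Nat.le_total chunk.length 3 with hle | hle2
            · rw [List.drop_eq_nil_of_le (by omega), List.drop_eq_nil_of_le (by omega)]
            · have : min 3 chunk.length = 3 := by omega
              rw [hklen, this]
          rw [pv_goB_esc d r hd, hfield, hdrop]
          by_cases hze : z = []
          · rw [hze] at hdzl ⊢
            have hnosep : '\\' ∉ d :: r := by
              rw [hdzl]; simpa using hchunkfree
            rw [pv_splitOn_nosep _ hnosep]
            have hgb : pvGoB (chunk.drop 3 ++ []) = chunk.drop 3 := by
              have := pv_goB_free (chunk.drop 3) [] hdropfree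
              simpa [pvGoB] using this
            rw [hgb]
            have hl3 : (d :: r) = chunk := by simpa using hdzl
            rw [← hl3] at hchunkne ⊢
            rw [pv_loopA_cons_ne _ _ _ hchunkne]
            simp [pvLoopA]
          · have hzhead : z = '\\' :: z.tail := by
              rcases hzz : z with _ | ⟨a, t⟩
              · exact absurd hzz hze
              · have ha := pv_dropWhile_head (d :: r) a t (by rw [← hz, hzz])
                subst ha; simp
            have hlen2 : z.tail.length ≤ n := by
              have hle := congrArg List.length hdzl
              have hc1 : 1 ≤ chunk.length := by
                rw [hchunk, List.takeWhile_cons_of_pos (by simp [hd])]; simp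
              have hz1 : z.length = z.tail.length + 1 := by
                rw [hzhead]; simp
              simp at hle hl; omega
            have hSrest : PySem.Chars.splitOn (d :: r) ['\\'] = chunk :: PySem.Chars.splitOn z.tail ['\\'] := by
              conv_lhs => rw [hdzl, hzhead]
              exact pv_splitOn_cons _ _ hchunkfree
            rw [hSrest]
            rw [show chunk.drop 3 ++ z = chunk.drop 3 ++ ('\\' :: z.tail) by rw [← hzhead]]
            rw [pv_goB_free _ _ hdropfree, q z.tail hlen2]
            rw [pv_loopA_cons_ne _ _ _ hchunkne]
            conv_rhs => rw [pv_loopA_acc]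
            simp

-- ===== VERDICT (by name: the statement is the Claim_ definition above) =====
theorem unescapeText_py_spec : Claim_equal_unescapeText_py := by
  intro text _ _
  unfold Spec_unescapeText_py
  have h := (pv_main text.toList.length text.toList le_rfl).1
  show String.ofList (pvLoopA (PySem.Chars.splitOn text.toList ['\\']).tail
      ((PySem.Chars.splitOn text.toList ['\\']).headD [])) = String.ofList (pvGoB text.toList)
  rw [pv_loopA_acc, ← h]
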